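-- pv_equiv track=rewrite | github.com/levinericzimmermann/nongkrong | nongkrong/algorithms/instruments/kecapi.py | divide_stresses
-- ===== SOURCE A (Python) =====
-- def divide_stresses(stresses) -> tuple:
--     divided = []
--     stresses_group = []
--     for stress in stresses:
--         stresses_group.append(stress)
--         if stress:
--             divided.append(tuple(stresses_group))
--             stresses_group = []
--     if stresses_group:
--         divided.append(tuple(stresses_group))
--     return tuple(divided)
-- ===== SOURCE B (Python) =====
-- def divide_stresses(stresses) -> tuple:
--     lst = list(stresses)
--     cuts = [i for i, s in enumerate(lst) if s]
--     chunks = []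
--     prev = 0
--     for idx in cuts:
--         chunks.append(tuple(lst[prev:idx + 1]))
--         prev = idx + 1
--     if prev < len(lst):
--         chunks.append(tuple(lst[prev:]))
--     return tuple(chunks)
-- ===== Notes on version B (the rewrite author's own statement) =====
-- stated objective: alternative
-- what changed: Replaces the accumulate-and-flush group buffer with a boundary-index table: collect the indices of truthy elements once, then emit each chunk by slicing between consecutive boundaries, plus the trailing remainder.
import Mathlib
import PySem

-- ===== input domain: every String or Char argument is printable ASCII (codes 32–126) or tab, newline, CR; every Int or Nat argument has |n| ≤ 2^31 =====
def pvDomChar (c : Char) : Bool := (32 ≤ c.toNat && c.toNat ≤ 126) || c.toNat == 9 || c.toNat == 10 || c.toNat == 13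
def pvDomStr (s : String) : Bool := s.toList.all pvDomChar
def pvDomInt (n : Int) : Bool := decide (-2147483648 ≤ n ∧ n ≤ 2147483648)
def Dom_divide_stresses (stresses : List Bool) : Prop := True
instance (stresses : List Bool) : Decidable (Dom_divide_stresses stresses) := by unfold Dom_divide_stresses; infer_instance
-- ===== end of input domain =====

-- B replaces A's accumulate-and-flush group buffer by a boundary-index table plus slicing (alternative decomposition, same cost).

-- ===== PORT A =====
-- one loop step of A: append stress to the group, flush the group on a truthy stress
def aStep (acc : List (List Bool) × List Bool) (stress : Bool) : List (List Bool) × List Bool :=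
  let g := acc.2 ++ [stress]
  if stress then (acc.1 ++ [g], []) else (acc.1, g)

-- A's trailing `if stresses_group: divided.append(...)`
def aFinish (st : List (List Bool) × List Bool) : List (List Bool) :=
  if st.2.isEmpty then st.1 else st.1 ++ [st.2]

def divide_stresses (stresses : List Bool) : List (List Bool) :=
  aFinish (stresses.foldl aStep ([], []))

-- ===== PORT B =====
-- B's `cuts = [i for i, s in enumerate(lst) if s]`
def cuts (lst : List Bool) : List Nat :=
  (List.range lst.length).filter (fun i => lst.getD i false)

-- B's `for idx in cuts` loop: state = (chunks, prev); chunk = lst[prev:idx+1]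
def bFold (lst : List Bool) (cs : List Nat) (acc : List (List Bool)) (prev : Nat) :
    List (List Bool) × Nat :=
  cs.foldl (fun s i => (s.1 ++ [(lst.drop s.2).take (i + 1 - s.2)], i + 1)) (acc, prev)

-- B's trailing `if prev < len(lst): chunks.append(tuple(lst[prev:]))`
def bFinish (lst : List Bool) (r : List (List Bool) × Nat) : List (List Bool) :=
  if r.2 < lst.length then r.1 ++ [lst.drop r.2] else r.1

def divide_stresses_alt (stresses : List Bool) : List (List Bool) :=
  bFinish stresses (bFold stresses (cuts stresses) [] 0)

-- ===== PRECONDITION & SPEC =====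
def Spec_divide_stresses (stresses : List Bool) (out : List (List Bool)) : Prop := out = divide_stresses_alt stresses
instance (stresses : List Bool) (out : List (List Bool)) : Decidable (Spec_divide_stresses stresses out) := by unfold Spec_divide_stresses; infer_instance

-- ===== CLAIM (what is proved, stated in full; the proofs are below) =====
def Claim_equal_divide_stresses : Prop := ∀ (stresses : List Bool), Dom_divide_stresses stresses → Spec_divide_stresses stresses (divide_stresses stresses)

-- ===== LEMMAS AND PROOFS =====

-- reference chunking: shared recursive characterisation both ports are proved equal to
def chunksRec : List Bool → List (List Bool)
  | [] => []
  | true :: xs => [true] :: chunksRec xs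
  | false :: xs =>
    match chunksRec xs with
    | [] => [[false]]
    | c :: cs => (false :: c) :: cs

theorem chunksRec_true (xs : List Bool) : chunksRec (true :: xs) = [true] :: chunksRec xs := rfl

theorem chunksRec_false (xs : List Bool) :
    chunksRec (false :: xs) =
      match chunksRec xs with
      | [] => [[false]]
      | c :: cs => (false :: c) :: cs := rfl

-- prepend a pending group to the first chunk (or emit it alone if no chunks follow)
def consFirst (g : List Bool) : List (List Bool) → List (List Bool)
  | [] => if g.isEmpty then [] else [g]
  | c :: cs => (g ++ c) :: cs

theorem consFirst_nil (cs : List (List Bool)) : consFirst [] cs = cs := by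
  cases cs <;> simp [consFirst]

-- ===== A side =====

theorem a_fold_eq (xs : List Bool) :
    ∀ (d : List (List Bool)) (g : List Bool),
      aFinish (xs.foldl aStep (d, g)) = d ++ consFirst g (chunksRec xs) := by
  induction xs with
  | nil =>
    intro d g
    cases g <;> simp [aFinish, consFirst, chunksRec]
  | cons x xs ih =>
    intro d g
    cases x with
    | true =>
      rw [show ((true :: xs).foldl aStep (d, g)) = xs.foldl aStep (d ++ [g ++ [true]], []) from by
        simp [aStep]]
      rw [ih, consFirst_nil, chunksRec_true, consFirst]
      simp
    | false =>
      rw [show ((false :: xs).foldl aStep (d, g)) = xs.foldl aStep (d, g ++ [false]) from by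
        simp [aStep]]
      rw [ih, chunksRec_false]
      cases h : chunksRec xs with
      | nil => cases g <;> simp [consFirst]
      | cons c cs => simp [consFirst]

theorem a_eq_chunksRec (xs : List Bool) : divide_stresses xs = chunksRec xs := by
  have := a_fold_eq xs [] []
  simpa [divide_stresses, consFirst_nil] using this

-- ===== B side =====

-- the cut-index table of x :: xs viewed through the table of xs
theorem cuts_cons_true (xs : List Bool) :
    cuts (true :: xs) = 0 :: (cuts xs).map (· + 1) := by
  unfold cuts
  simp only [List.length_cons, List.range_succ_eq_map, List.filter_cons, List.filter_map]
  simp [Function.comp_def]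

theorem cuts_cons_false (xs : List Bool) :
    cuts (false :: xs) = (cuts xs).map (· + 1) := by
  unfold cuts
  simp only [List.length_cons, List.range_succ_eq_map, List.filter_cons, List.filter_map]
  simp [Function.comp_def]

-- the chunks accumulator only ever grows by appending
theorem bFold_acc (lst : List Bool) (cs : List Nat) :
    ∀ (acc : List (List Bool)) (p : Nat),
      bFold lst cs acc p = (acc ++ (bFold lst cs [] p).1, (bFold lst cs [] p).2) := by
  induction cs with
  | nil => intro acc p; simp [bFold]
  | cons i cs ih =>
    intro acc p
    simp only [bFold, List.foldl_cons, List.nil_append] at *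
    rw [ih (acc ++ [(lst.drop p).take (i + 1 - p)]) (i + 1),
        ih [(lst.drop p).take (i + 1 - p)] (i + 1)]
    simp

-- shifting every cut index by one matches prepending one element and shifting prev
theorem bFold_shift (x : Bool) (lst : List Bool) (cs : List Nat) :
    ∀ (acc : List (List Bool)) (p : Nat),
      bFold (x :: lst) (cs.map (· + 1)) acc (p + 1)
        = ((bFold lst cs acc p).1, (bFold lst cs acc p).2 + 1) := by
  induction cs with
  | nil => intro acc p; simp [bFold]
  | cons i cs ih =>
    intro acc p
    simp only [bFold, List.map_cons, List.foldl_cons, List.drop_succ_cons] at *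
    rw [show i + 1 + 1 - (p + 1) = i + 1 - p from by omega]
    exact ih _ _

-- the final remainder check distributes over an already-emitted head chunk
theorem bFinish_cons (lst : List Bool) (h : List Bool) (l : List (List Bool)) (p : Nat) :
    bFinish lst (h :: l, p) = h :: bFinish lst (l, p) := by
  unfold bFinish; split <;> simp

theorem b_eq_chunksRec (xs : List Bool) : divide_stresses_alt xs = chunksRec xs := by
  induction xs with
  | nil => decide
  | cons x xs ih =>
    cases x with
    | true =>
      unfold divide_stresses_alt
      rw [cuts_cons_true]
      rw [show bFold (true :: xs) (0 :: (cuts xs).map (· + 1)) [] 0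
            = bFold (true :: xs) ((cuts xs).map (· + 1)) [[true]] (0 + 1) from by
        simp [bFold]]
      rw [bFold_shift, bFold_acc, chunksRec_true, ← ih]
      unfold divide_stresses_alt
      rw [show ([[true]] ++ (bFold xs (cuts xs) [] 0).1 : List (List Bool))
            = [true] :: (bFold xs (cuts xs) [] 0).1 from by simp]
      rw [bFinish_cons]
      unfold bFinish
      simp
    | false =>
      unfold divide_stresses_alt
      rw [cuts_cons_false]
      cases hc : cuts xs with
      | nil =>
        -- no truthy element in xs: a single trailing chunk
        have hx : chunksRec xs = if 0 < xs.length then [xs] else [] := by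
          rw [← ih]; unfold divide_stresses_alt; rw [hc]; simp [bFold, bFinish]
        rw [chunksRec_false, hx]
        simp only [List.map_nil]
        cases xs with
        | nil => decide
        | cons y ys => simp [bFold, bFinish]
      | cons c cs =>
        -- first chunk gets the leading false prepended; the rest is xs's chunking
        have hx : chunksRec xs
            = xs.take (c + 1) :: bFinish xs (bFold xs cs [] (c + 1)) := by
          rw [← ih]; unfold divide_stresses_alt; rw [hc]
          rw [show bFold xs (c :: cs) [] 0 = bFold xs cs [xs.take (c + 1)] (c + 1) from by
            simp [bFold]]
          rw [bFold_acc]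
          rw [show ([xs.take (c + 1)] ++ (bFold xs cs [] (c + 1)).1 : List (List Bool))
                = xs.take (c + 1) :: (bFold xs cs [] (c + 1)).1 from by simp]
          rw [bFinish_cons]
        rw [chunksRec_false, hx]
        simp only [List.map_cons]
        rw [show bFold (false :: xs) ((c + 1) :: (cs.map (· + 1))) [] 0
              = bFold (false :: xs) (cs.map (· + 1)) [[false] ++ xs.take (c + 1)] (c + 1 + 1) from by
          simp [bFold, List.take_succ_cons]]
        rw [bFold_shift, bFold_acc]
        rw [show ([[false] ++ xs.take (c + 1)] ++ (bFold xs cs [] (c + 1)).1 : List (List Bool))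
              = (false :: xs.take (c + 1)) :: (bFold xs cs [] (c + 1)).1 from by simp]
        rw [bFinish_cons]
        unfold bFinish
        simp

-- ===== VERDICT (by name: the statement is the Claim_ definition above) =====
theorem divide_stresses_spec : Claim_equal_divide_stresses := by
  intro xs _
  unfold Spec_divide_stresses
  rw [a_eq_chunksRec, b_eq_chunksRec]
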